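-- pv_equiv track=rewrite | github.com/Lact0/Advent-Of-Code | 2025/10/p2 copy 2.py | gen_vars_eqs
-- ===== SOURCE A (Python) =====
-- def gen_vars_eqs(target, buttons):
--     vars = [-1 for _ in buttons]
--     eqs = []
--     for i in range(len(target)):
--         rhs = target[i]
--         lhs = [j for j in range(len(buttons)) if i in buttons[j]]
--         eqs.append((rhs, lhs))
--     return vars, eqs
-- ===== SOURCE B (Python) =====
-- def gen_vars_eqs(target, buttons):
--     n = len(target)
--     lhs = [[] for _ in range(n)]
--     for j, btn in enumerate(buttons):
--         for i in set(btn):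
--             if 0 <= i < n:
--                 lhs[i].append(j)
--     return [-1] * len(buttons), [(target[i], lhs[i]) for i in range(n)]
-- ===== Notes on version B (the rewrite author's own statement) =====
-- stated objective: faster
-- what changed: Instead of scanning every button for every target index (membership test per pair), B iterates each button once and scatters its index into the equation lists of the target positions it contains.
import Mathlib
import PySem

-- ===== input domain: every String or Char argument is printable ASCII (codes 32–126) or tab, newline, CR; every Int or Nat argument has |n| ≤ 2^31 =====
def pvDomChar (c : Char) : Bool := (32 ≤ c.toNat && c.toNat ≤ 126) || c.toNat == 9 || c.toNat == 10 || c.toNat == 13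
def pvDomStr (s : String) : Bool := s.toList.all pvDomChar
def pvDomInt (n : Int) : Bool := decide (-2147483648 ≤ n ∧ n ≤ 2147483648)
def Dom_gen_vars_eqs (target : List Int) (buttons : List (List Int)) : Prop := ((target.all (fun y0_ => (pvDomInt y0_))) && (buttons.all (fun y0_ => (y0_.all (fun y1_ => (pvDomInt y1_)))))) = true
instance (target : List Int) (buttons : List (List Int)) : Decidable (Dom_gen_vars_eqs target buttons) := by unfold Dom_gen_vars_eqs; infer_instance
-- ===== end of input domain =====

-- B replaces A's per-target-index scan of every button by one scatter pass over the buttons (faster: asymptotic).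

-- ===== PORT A =====
-- target[i] and buttons[j] are indexed by range(len(…)), so the index is always in range: getD is exact there.
def gen_vars_eqs (target : List Int) (buttons : List (List Int)) : List Int × (List (Int × List Int)) :=
  let vars : List Int := buttons.map (fun _ => (-1 : Int))
  let eqs : List (Int × List Int) :=
    (List.range target.length).foldl (fun eqs i =>
      let rhs := target.getD i 0
      let lhs := ((List.range buttons.length).filter
          (fun j => (i : Int) ∈ buttons.getD j [])).map (fun (j : Nat) => (j : Int))
      eqs ++ [(rhs, lhs)]) []
  (vars, eqs)

-- ===== PORT B =====
-- inner loop of Source B: for i in set(btn): if 0 <= i < n: lhs[i].append(j)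
def pvAltInner (n : Nat) (j : Int) (lhs : List (List Int)) (s : PySem.Set Int) : List (List Int) :=
  s.foldl (fun lhs i =>
    if 0 ≤ i ∧ i < (n : Int) then
      PySem.List.pySetD lhs i (PySem.List.pyGetD lhs i [] ++ [j])
    else lhs) lhs

def gen_vars_eqs_alt (target : List Int) (buttons : List (List Int)) : List Int × (List (Int × List Int)) :=
  let n := target.length
  let lhs0 : List (List Int) := (List.range n).map (fun _ => ([] : List Int))
  let lhsF := (PySem.List.enumerate buttons).foldl
      (fun lhs jb => pvAltInner n jb.1 lhs (PySem.Set.ofList jb.2)) lhs0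
  (buttons.map (fun _ => (-1 : Int)),
   (List.range n).map (fun i => (target.getD i 0, lhsF.getD i [])))

-- ===== PRECONDITION & SPEC =====
def Spec_gen_vars_eqs (target : List Int) (buttons : List (List Int)) (out : List Int × (List (Int × List Int))) : Prop := out = gen_vars_eqs_alt target buttons
instance (target : List Int) (buttons : List (List Int)) (out : List Int × (List (Int × List Int))) : Decidable (Spec_gen_vars_eqs target buttons out) := by unfold Spec_gen_vars_eqs; infer_instance

-- ===== CLAIM (what is proved, stated in full; the proofs are below) =====
def Claim_equal_gen_vars_eqs : Prop := ∀ (target : List Int) (buttons : List (List Int)), Dom_gen_vars_eqs target buttons → Spec_gen_vars_eqs target buttons (gen_vars_eqs target buttons)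

-- ===== LEMMAS AND PROOFS =====

theorem pvAltInner_length (n : Nat) (j : Int) (s : List Int) (lhs : List (List Int)) :
    (pvAltInner n j lhs s).length = lhs.length := by
  induction s generalizing lhs with
  | nil => rfl
  | cons x t ih =>
      simp only [pvAltInner, List.foldl_cons] at *
      rw [ih]
      split
      · exact PySem.List.length_pySetD ..
      · rfl

theorem pvAltInner_getD (n : Nat) (j : Int) (s : List Int) (hnd : s.Nodup)
    (lhs : List (List Int)) (hlen : lhs.length = n) (i : Nat) (hi : i < n) :
    (pvAltInner n j lhs s).getD i [] =
      if (i : Int) ∈ s then lhs.getD i [] ++ [j] else lhs.getD i [] := by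
  induction s generalizing lhs with
  | nil => simp [pvAltInner]
  | cons x t ih =>
      rcases List.nodup_cons.mp hnd with ⟨hx, hnd'⟩
      simp only [pvAltInner, List.foldl_cons] at *
      by_cases hxi : x = (i : Int)
      · subst hxi
        have hg : (0 : Int) ≤ (i : Int) ∧ (i : Int) < (n : Int) := by
          constructor <;> omega
        rw [if_pos hg, PySem.List.pySetD_natCast, PySem.List.pyGetD_natCast]
        have hlen' : (lhs.set i (lhs.getD i [] ++ [j])).length = n := by simp [hlen]
        rw [ih hnd' _ hlen', if_neg hx]
        have : ((i : Int) ∈ (i : Int) :: t) := List.mem_cons_self ..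
        rw [if_pos this]
        simp [List.getD, List.getElem?_set_self (by omega : i < lhs.length)]
      · have hstep : ∀ lhs' : List (List Int), lhs'.length = n →
            (if 0 ≤ x ∧ x < (n : Int) then
              PySem.List.pySetD lhs' x (PySem.List.pyGetD lhs' x [] ++ [j]) else lhs').getD i []
            = lhs'.getD i [] := by
          intro lhs' _
          split
          · next hg =>
              rw [PySem.List.pySetD_of_nonneg _ _ hg.1]
              have : x.toNat ≠ i := by omega
              simp [List.getD, List.getElem?_set_ne this]
          · rfl
        split
        · next hg =>
            have hlen' : (PySem.List.pySetD lhs x (PySem.List.pyGetD lhs x [] ++ [j])).length = n := by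
              rw [PySem.List.length_pySetD]; exact hlen
            rw [ih hnd' _ hlen']
            have hmem : ((i : Int) ∈ x :: t) ↔ ((i : Int) ∈ t) :=
              ⟨fun h => (List.mem_cons.mp h).resolve_left (fun h2 => hxi h2.symm),
               List.mem_cons_of_mem x⟩
            have h2 : (PySem.List.pySetD lhs x (PySem.List.pyGetD lhs x [] ++ [j])).getD i []
                = lhs.getD i [] := by
              have := hstep lhs hlen
              rwa [if_pos hg] at this
            rw [h2]
            simp only [hmem]
        · rw [ih hnd' _ hlen]
          have hmem : ((i : Int) ∈ x :: t) ↔ ((i : Int) ∈ t) :=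
            ⟨fun h => (List.mem_cons.mp h).resolve_left (fun h2 => hxi h2.symm),
             List.mem_cons_of_mem x⟩
          simp only [hmem]

theorem pvAltFold_getD (n : Nat) (ps : List (Int × List Int))
    (lhs : List (List Int)) (hlen : lhs.length = n) (i : Nat) (hi : i < n) :
    ((ps.foldl (fun lhs jb => pvAltInner n jb.1 lhs (PySem.Set.ofList jb.2)) lhs).getD i []) =
      lhs.getD i [] ++ (ps.filter (fun p => (i : Int) ∈ p.2)).map (fun p => p.1) := by
  induction ps generalizing lhs with
  | nil => simp
  | cons p t ih =>
      simp only [List.foldl_cons]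
      have hlen' : (pvAltInner n p.1 lhs (PySem.Set.ofList p.2)).length = n := by
        rw [pvAltInner_length]; exact hlen
      rw [ih _ hlen',
        pvAltInner_getD n p.1 _ (PySem.Set.nodup_ofList p.2) lhs hlen i hi]
      by_cases hm : (i : Int) ∈ p.2
      · rw [if_pos ((PySem.Set.mem_ofList p.2 _).mpr hm)]
        simp [hm]
      · rw [if_neg (fun h => hm ((PySem.Set.mem_ofList p.2 _).mp h))]
        simp [hm]

theorem pvShiftFilterMap (Q : Nat → Bool) (f : Nat → Int) (l : List Nat) :
    ((l.map Nat.succ).filter Q).map f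
      = (l.filter (fun t => Q (t + 1))).map (fun t => f (t + 1)) := by
  induction l with
  | nil => rfl
  | cons a l ih =>
      simp only [List.map_cons, List.filter_cons, Nat.succ_eq_add_one]
      split <;> simp_all

theorem pvEnumFilter (c : Int) (bs : List (List Int)) (k : Int) :
    ((PySem.List.enumerate bs k).filter (fun p => c ∈ p.2)).map (fun p => p.1) =
      ((List.range bs.length).filter (fun t => c ∈ bs.getD t [])).map (fun (t : Nat) => k + (t : Int)) := by
  induction bs generalizing k with
  | nil => simp [PySem.List.enumerate]
  | cons b bs ih =>
      rw [show PySem.List.enumerate (b :: bs) k = (k, b) :: PySem.List.enumerate bs (k + 1) from rfl]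
      rw [List.length_cons, List.range_succ_eq_map]
      rw [List.filter_cons, List.filter_cons]
      by_cases hb : c ∈ b
      · rw [if_pos (by simpa using hb), if_pos (by simpa using hb)]
        simp only [List.map_cons]
        rw [pvShiftFilterMap, ih (k + 1)]
        simp only [List.getD_cons_succ]
        refine List.cons_eq_cons.mpr ⟨by simp, ?_⟩
        apply List.map_congr_left
        intro t _
        push_cast
        ring
      · rw [if_neg (by simpa using hb), if_neg (by simpa using hb)]
        rw [pvShiftFilterMap, ih (k + 1)]
        simp only [List.getD_cons_succ]
        apply List.map_congr_left
        intro t _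
        push_cast
        ring

-- ===== VERDICT (by name: the statement is the Claim_ definition above) =====
theorem gen_vars_eqs_spec : Claim_equal_gen_vars_eqs := by
  intro target buttons _
  unfold Spec_gen_vars_eqs gen_vars_eqs gen_vars_eqs_alt
  dsimp only
  refine Prod.ext rfl ?_
  dsimp only
  rw [PySem.List.foldl_append_singleton_eq_map, List.nil_append]
  apply List.map_congr_left
  intro i hi
  have hi' : i < target.length := List.mem_range.mp hi
  refine Prod.ext rfl ?_
  dsimp only
  have hlen0 : ((List.range target.length).map (fun _ => ([] : List Int))).length
      = target.length := by simp
  rw [pvAltFold_getD target.length _ _ hlen0 i hi']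
  have h0 : ((List.range target.length).map (fun _ => ([] : List Int))).getD i [] = [] := by
    simp [List.getD]
  rw [h0, List.nil_append, pvEnumFilter ((i : Int)) buttons 0]
  apply List.map_congr_left
  intro t _
  omega
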